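-- pv_equiv track=rewrite | github.com/zeeshan4002911/DSA-reloaded | 1.data-structure/2.string/easy/count-number-of-equal-pair-in-string.py | count_number_of_equal_pairs
-- ===== SOURCE A (Python) =====
-- def count_number_of_equal_pairs(s):
--     count_arr = [0] * 26
--
--     # Counting the occurrence of each character of string
--     for char in s:
--         char_ascii = ord(char.lower()) - ord('a')
--         if 0 <= char_ascii < 26:
--             count_arr[char_ascii] += 1
--
--     result = 0
--     # Calculation of pairs using occurence ^ 2
--     for count in count_arr:
--         result += count ** 2
--     return result
-- ===== SOURCE B (Python) =====
-- def count_number_of_equal_pairs(s):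
--     # Naive double scan: count ordered position pairs (i, j), including i == j,
--     # whose characters are letters that match case-insensitively.
--     result = 0
--     for ci in s:
--         x = ord(ci.lower()) - ord('a')
--         if 0 <= x < 26:
--             for cj in s:
--                 y = ord(cj.lower()) - ord('a')
--                 if 0 <= y < 26 and x == y:
--                     result += 1
--     return result
-- ===== Notes on version B (the rewrite author's own statement) =====
-- stated objective: alternative
-- what changed: Replaces the 26-slot frequency array and sum of squared counts by a naive double loop over position pairs: sum of count^2 equals the number of ordered pairs of matching letter positions, so no count table is maintained.
import Mathlib
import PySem

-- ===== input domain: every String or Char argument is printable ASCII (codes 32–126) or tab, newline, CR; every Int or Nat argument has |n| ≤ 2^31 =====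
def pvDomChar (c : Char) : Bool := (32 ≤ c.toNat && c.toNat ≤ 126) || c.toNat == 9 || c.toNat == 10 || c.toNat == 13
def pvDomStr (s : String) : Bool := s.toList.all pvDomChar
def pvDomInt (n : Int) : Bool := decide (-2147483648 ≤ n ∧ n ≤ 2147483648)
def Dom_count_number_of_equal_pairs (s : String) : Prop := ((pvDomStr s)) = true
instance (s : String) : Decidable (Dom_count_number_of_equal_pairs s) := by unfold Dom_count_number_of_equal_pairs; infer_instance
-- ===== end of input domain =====

-- B replaces A's 26-slot frequency array and sum of squared counts by a naive double
-- loop counting ordered pairs of matching letter positions (alternative decomposition).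

-- ===== PORT A =====
def count_number_of_equal_pairs (s : String) : Int :=
  let count_arr : List Int := List.replicate 26 0
  let count_arr := s.toList.foldl (fun arr char =>
    let char_ascii : Int := ((PySem.Chars.lowerChar char).toNat : Int) - 97
    if 0 ≤ char_ascii ∧ char_ascii < 26 then
      arr.set char_ascii.toNat (arr.getD char_ascii.toNat 0 + 1)
    else arr) count_arr
  count_arr.foldl (fun result count => result + count ^ 2) 0

-- ===== PORT B =====
def count_number_of_equal_pairs_alt (s : String) : Int :=
  s.toList.foldl (fun result ci =>
    let x : Int := ((PySem.Chars.lowerChar ci).toNat : Int) - 97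
    if 0 ≤ x ∧ x < 26 then
      s.toList.foldl (fun r cj =>
        let y : Int := ((PySem.Chars.lowerChar cj).toNat : Int) - 97
        if 0 ≤ y ∧ y < 26 ∧ x = y then r + 1 else r) result
    else result) 0

-- ===== PRECONDITION & SPEC =====
def Spec_count_number_of_equal_pairs (s : String) (out : Int) : Prop := out = count_number_of_equal_pairs_alt s
instance (s : String) (out : Int) : Decidable (Spec_count_number_of_equal_pairs s out) := by unfold Spec_count_number_of_equal_pairs; infer_instance

-- ===== CLAIM (what is proved, stated in full; the proofs are below) =====
def Claim_equal_count_number_of_equal_pairs : Prop := ∀ (s : String), Dom_count_number_of_equal_pairs s → Spec_count_number_of_equal_pairs s (count_number_of_equal_pairs s)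

-- ===== LEMMAS AND PROOFS =====

-- normalized key of a character, and the count of characters of a list with a given key
def pvKey (c : Char) : Int := ((PySem.Chars.lowerChar c).toNat : Int) - 97

def pvCnt (k : Int) (cs : List Char) : Int := (cs.countP (fun c => pvKey c == k) : Int)

lemma pvCnt_cons (k : Int) (c : Char) (cs : List Char) :
    pvCnt k (c :: cs) = (if pvKey c = k then 1 else 0) + pvCnt k cs := by
  simp only [pvCnt, List.countP_cons]
  by_cases h : pvKey c = k <;> simp [h] <;> ring

-- B's inner loop sums the occurrences of key x (x a valid letter key)
lemma inner_loop (x : Int) (hx0 : 0 ≤ x) (hx1 : x < 26) :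
    ∀ (ds : List Char) (r : Int),
      ds.foldl (fun r cj =>
        if 0 ≤ pvKey cj ∧ pvKey cj < 26 ∧ x = pvKey cj then r + 1 else r) r
      = r + pvCnt x ds := by
  intro ds
  induction ds with
  | nil => intro r; simp [pvCnt]
  | cons c cs ih =>
    intro r
    simp only [List.foldl_cons, ih, pvCnt_cons]
    by_cases h : pvKey c = x
    · rw [if_pos ⟨h.symm ▸ hx0, h.symm ▸ hx1, h.symm⟩, if_pos h]; ring
    · rw [if_neg (fun hc => h hc.2.2.symm), if_neg h]; ring

-- B's outer loop equals the sum, over characters of cs, of the occurrence count (in ds) of their key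
lemma outer_loop (ds : List Char) :
    ∀ (cs : List Char) (r : Int),
      cs.foldl (fun result ci =>
        if 0 ≤ pvKey ci ∧ pvKey ci < 26 then
          ds.foldl (fun r cj =>
            if 0 ≤ pvKey cj ∧ pvKey cj < 26 ∧ pvKey ci = pvKey cj then r + 1 else r) result
        else result) r
      = r + (cs.map (fun c => if 0 ≤ pvKey c ∧ pvKey c < 26 then pvCnt (pvKey c) ds else 0)).sum := by
  intro cs
  induction cs with
  | nil => intro r; simp
  | cons c cs ih =>
    intro r
    simp only [List.foldl_cons, List.map_cons, List.sum_cons]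
    by_cases h : 0 ≤ pvKey c ∧ pvKey c < 26
    · rw [if_pos h, inner_loop _ h.1 h.2 ds r, ih, if_pos h]
      ring
    · rw [if_neg h, ih, if_neg h]
      ring

-- list-sum over range ↔ Finset sum
lemma list_range_map_sum (f : Nat → Int) (n : Nat) :
    ((List.range n).map f).sum = ∑ k ∈ Finset.range n, f k := by
  induction n with
  | zero => simp
  | succ n ih => simp [List.range_succ, Finset.sum_range_succ, ih]

-- double counting: per-character occurrence sums equal the sum over keys of products of counts
lemma ind_sum (b : Nat → Int) (x : Int) (h0 : 0 ≤ x) : ∀ n : Nat, x < n →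
    (∑ k ∈ Finset.range n, if x = (k : Int) then b k else 0) = b x.toNat := by
  intro n
  induction n with
  | zero => intro h; omega
  | succ n ih =>
    intro hlt
    rw [Finset.sum_range_succ]
    by_cases he : x = (n : Int)
    · rw [if_pos he]
      have : (∑ k ∈ Finset.range n, if x = (k : Int) then b k else 0) = 0 :=
        Finset.sum_eq_zero (fun k hk => if_neg (by simp only [Finset.mem_range] at hk; omega))
      rw [this, zero_add]
      congr 1
      omega
    · rw [if_neg he, ih (by omega), add_zero]
lemma double_count (ds : List Char) :
    ∀ (cs : List Char),
      (cs.map (fun c => if 0 ≤ pvKey c ∧ pvKey c < 26 then pvCnt (pvKey c) ds else 0)).sum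
      = ∑ k ∈ Finset.range 26, pvCnt (k : Int) cs * pvCnt (k : Int) ds := by
  intro cs
  induction cs with
  | nil => simp [pvCnt]
  | cons c cs ih =>
    simp only [List.map_cons, List.sum_cons, ih]
    have hexp : ∀ k : Nat, pvCnt (k : Int) (c :: cs) * pvCnt (k : Int) ds
        = (if pvKey c = (k : Int) then pvCnt (k : Int) ds else 0)
          + pvCnt (k : Int) cs * pvCnt (k : Int) ds := by
      intro k
      rw [pvCnt_cons]
      split_ifs <;> ring
    simp only [hexp]
    rw [Finset.sum_add_distrib]
    congr 1
    by_cases h : 0 ≤ pvKey c ∧ pvKey c < 26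
    · rw [if_pos h, ind_sum (fun k => pvCnt (k : Int) ds) (pvKey c) h.1 26 h.2,
         Int.toNat_of_nonneg h.1]
    · rw [if_neg h]
      symm
      apply Finset.sum_eq_zero
      intro k hk
      simp only [Finset.mem_range] at hk
      apply if_neg
      intro he
      apply h
      constructor
      · rw [he]; exact Int.natCast_nonneg k
      · rw [he]; exact_mod_cast hk

-- A's first loop, pointwise on the array (length preserved; slot i counts key i)
lemma fold_arr (cs : List Char) :
    ∀ (arr : List Int),
      (cs.foldl (fun arr char =>
        if 0 ≤ pvKey char ∧ pvKey char < 26 then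
          arr.set (pvKey char).toNat (arr.getD (pvKey char).toNat 0 + 1)
        else arr) arr).length = arr.length ∧
      (arr.length = 26 → ∀ i : Nat, i < 26 →
        (cs.foldl (fun arr char =>
          if 0 ≤ pvKey char ∧ pvKey char < 26 then
            arr.set (pvKey char).toNat (arr.getD (pvKey char).toNat 0 + 1)
          else arr) arr).getD i 0 = arr.getD i 0 + pvCnt (i : Int) cs) := by
  induction cs with
  | nil => intro arr; exact ⟨rfl, by intro _ i _; simp [pvCnt]⟩
  | cons c cs ih =>
    intro arr
    simp only [List.foldl_cons]
    by_cases h : 0 ≤ pvKey c ∧ pvKey c < 26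
    · rw [if_pos h]
      obtain ⟨hlen, hpt⟩ :=
        ih (arr.set (pvKey c).toNat (arr.getD (pvKey c).toNat 0 + 1))
      refine ⟨by simpa using hlen, ?_⟩
      intro h26 i hi
      rw [hpt (by simpa using h26) i hi, pvCnt_cons]
      have hmlt : (pvKey c).toNat < arr.length := by rw [h26]; omega
      by_cases he : pvKey c = (i : Int)
      · have hmi : (pvKey c).toNat = i := by omega
        rw [if_pos he, hmi]
        rw [List.getD_eq_getElem?_getD, List.getElem?_set_self (by omega), Option.getD_some]
        ring
      · have hne : (pvKey c).toNat ≠ i := by omega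
        rw [if_neg he,
            List.getD_eq_getElem?_getD, List.getElem?_set_ne hne, ← List.getD_eq_getElem?_getD]
        ring
    · rw [if_neg h]
      obtain ⟨hlen, hpt⟩ := ih arr
      refine ⟨hlen, ?_⟩
      intro h26 i hi
      rw [hpt h26 i hi, pvCnt_cons,
          if_neg (fun he => h ⟨by rw [he]; exact Int.natCast_nonneg i, by rw [he]; exact_mod_cast hi⟩)]
      ring

-- A's first loop from the all-zero array IS the table of key counts
lemma fold_arr_repl (cs : List Char) :
    cs.foldl (fun arr char =>
        if 0 ≤ pvKey char ∧ pvKey char < 26 then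
          arr.set (pvKey char).toNat (arr.getD (pvKey char).toNat 0 + 1)
        else arr) (List.replicate 26 (0 : Int))
      = (List.range 26).map (fun k : Nat => pvCnt (k : Int) cs) := by
  obtain ⟨hlen, hpt⟩ := fold_arr cs (List.replicate 26 (0 : Int))
  apply List.ext_getElem
  · rw [hlen, List.length_replicate, List.length_map, List.length_range]
  · intro i h1 h2
    have hi : i < 26 := by
      rw [List.length_map, List.length_range] at h2; exact h2
    have hrep : (List.replicate 26 (0 : Int)).getD i 0 = 0 := by
      rw [List.getD_eq_getElem?_getD, List.getElem?_replicate, if_pos hi, Option.getD_some]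
    have hthis := hpt (by simp) i hi
    rw [hrep, List.getD_eq_getElem?_getD, List.getElem?_eq_getElem h1, Option.getD_some,
        zero_add] at hthis
    rw [List.getElem_map, List.getElem_range]
    exact hthis

-- A's second loop is a sum of squares
lemma fold_sq : ∀ (arr : List Int) (r : Int),
    arr.foldl (fun result count => result + count ^ 2) r = r + (arr.map (fun c => c ^ 2)).sum := by
  intro arr
  induction arr with
  | nil => intro r; simp
  | cons a l ih => intro r; simp [ih]; ring

-- ===== VERDICT (by name: the statement is the Claim_ definition above) =====
theorem count_number_of_equal_pairs_spec : Claim_equal_count_number_of_equal_pairs := by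
  intro s _
  show (List.foldl (fun result count => result + count ^ 2) 0
      (List.foldl (fun arr char =>
        if 0 ≤ pvKey char ∧ pvKey char < 26 then
          arr.set (pvKey char).toNat (arr.getD (pvKey char).toNat 0 + 1)
        else arr) (List.replicate 26 (0 : Int)) s.toList))
    = List.foldl (fun result ci =>
        if 0 ≤ pvKey ci ∧ pvKey ci < 26 then
          List.foldl (fun r cj =>
            if 0 ≤ pvKey cj ∧ pvKey cj < 26 ∧ pvKey ci = pvKey cj then r + 1 else r) result s.toList
        else result) 0 s.toList
  rw [fold_arr_repl]
  rw [fold_sq]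
  rw [outer_loop s.toList s.toList 0]
  rw [double_count s.toList s.toList]
  rw [List.map_map]
  rw [list_range_map_sum]
  rw [zero_add, zero_add]
  refine Finset.sum_congr rfl ?_
  intro k _
  simp only [Function.comp_apply]
  ring
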